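-- pv_equiv track=rewrite | github.com/Japiahh/Pavita-Indonesian-Morphological-Preprocessing | modules/tokenizer/chakaria.py | split_particles
-- ===== SOURCE A (Python) =====
-- particles = ["lah", "kah", "tah", "pun"]
--
-- def split_particles(tokens):
--     processed = []
--     for token in tokens:
--         matched = False
--         for particle in sorted(particles, key=len, reverse=True):
--             if token.endswith(particle):
--                 root = token[:-len(particle)]
--                 if len(root) > 1:
--                     processed.append(root)
--                     processed.append('-'+particle)
--                     matched = True
--                     break
--         if not matched:
--             processed.append(token)
--     return processed
-- ===== SOURCE B (Python) =====
-- PARTICLE_SET = {"lah", "kah", "tah", "pun"}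
--
-- def split_particles(tokens):
--     processed = []
--     for token in tokens:
--         if len(token) > 4 and token[-3:] in PARTICLE_SET:
--             processed.append(token[:-3])
--             processed.append('-' + token[-3:])
--         else:
--             processed.append(token)
--     return processed
-- ===== Notes on version B (the rewrite author's own statement) =====
-- stated objective: faster
-- what changed: Replaces A's per-token re-sort of the particle list and inner scan over candidates (endswith per candidate) by a single direct lookup of the token's length-3 tail in a precomputed set, valid because every particle has length 3.
import Mathlib
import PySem

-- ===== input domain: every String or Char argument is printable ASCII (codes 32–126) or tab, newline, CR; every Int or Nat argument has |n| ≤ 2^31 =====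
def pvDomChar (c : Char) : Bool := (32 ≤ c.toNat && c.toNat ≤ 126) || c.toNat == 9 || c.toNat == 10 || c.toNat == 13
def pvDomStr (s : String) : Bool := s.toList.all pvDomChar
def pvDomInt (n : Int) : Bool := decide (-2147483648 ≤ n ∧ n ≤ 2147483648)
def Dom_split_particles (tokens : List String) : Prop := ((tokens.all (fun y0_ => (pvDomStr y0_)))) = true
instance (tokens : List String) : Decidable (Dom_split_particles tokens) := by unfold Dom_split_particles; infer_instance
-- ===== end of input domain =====

-- B replaces A's inner scan over a re-sorted particle list by a single lookup of the
-- token's length-3 tail in a precomputed particle set (all particles have length 3).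

-- ===== PORT A =====
def particles : List String := ["lah", "kah", "tah", "pun"]

/-- A's inner `for particle in sorted(particles, key=len, reverse=True)` loop with its
`break`: returns the `(root, particle)` pair appended on the first match, `none` if none. -/
def innerA (token : String) : List String → Option (String × String)
  | [] => none
  | p :: rest =>
    if PySem.Str.endswith token p then
      let root := PySem.Str.slice token none (some (-(PySem.Str.len p : Int)))
      if 1 < PySem.Str.len root then some (root, p) else innerA token rest
    else innerA token rest

def split_particles (tokens : List String) : List String :=
  tokens.foldl (fun processed token =>
    match innerA token (PySem.List.sorted particles (fun p => PySem.Str.len p) true) with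
    | some (root, p) => processed ++ [root, "-" ++ p]
    | none => processed ++ [token]) []

-- ===== PORT B =====
def particleSet : PySem.Set String := PySem.Set.ofList ["lah", "kah", "tah", "pun"]

def split_particles_alt (tokens : List String) : List String :=
  tokens.foldl (fun processed token =>
    if 4 < PySem.Str.len token
        && PySem.Set.contains particleSet (PySem.Str.slice token (some (-3)) none) then
      processed ++ [PySem.Str.slice token none (some (-3)),
                    "-" ++ PySem.Str.slice token (some (-3)) none]
    else
      processed ++ [token]) []

-- ===== PRECONDITION & SPEC =====
def Spec_split_particles (tokens : List String) (out : List String) : Prop := out = split_particles_alt tokens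
instance (tokens : List String) (out : List String) : Decidable (Spec_split_particles tokens out) := by unfold Spec_split_particles; infer_instance

-- ===== CLAIM (what is proved, stated in full; the proofs are below) =====
def Claim_equal_split_particles : Prop := ∀ (tokens : List String), Dom_split_particles tokens → Spec_split_particles tokens (split_particles tokens)

-- ===== LEMMAS AND PROOFS =====

theorem sorted_particles_eq :
    PySem.List.sorted particles (fun p => PySem.Str.len p) true = particles := by decide

theorem rootA_toList (t : String) :
    (PySem.Str.slice t none (some (-3))).toList = t.toList.take (t.toList.length - 3) := by
  simp only [Int.reduceNeg, PySem.Str.toList_slice, PySem.Chars.slice_eq_listSlice,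
    Nat.one_lt_ofNat, PySem.List.slice_to_neg_ofNat, String.length_toList]

theorem suffix_toList (t : String) :
    (PySem.Str.slice t (some (-3)) none).toList = t.toList.drop (t.toList.length - 3) := by
  simp only [Int.reduceNeg, PySem.Str.toList_slice, PySem.Chars.slice_eq_listSlice,
    Nat.one_lt_ofNat, PySem.List.slice_from_neg_ofNat, String.length_toList]

theorem rootA_len (t : String) :
    PySem.Str.len (PySem.Str.slice t none (some (-3))) = ((t.length - 3 : Nat) : Int) := by
  rw [PySem.Str.len_eq, rootA_toList, List.length_take]
  congr 1
  simp [String.length_toList]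

-- ending with a length-3 particle means "the last three characters are that particle"
theorem endswith_len3 (t p : String) (hp : p.toList.length = 3) :
    PySem.Str.endswith t p = true ↔ t.toList.drop (t.toList.length - 3) = p.toList := by
  rw [PySem.Str.endswith_eq, PySem.Chars.endswith_iff, List.suffix_iff_eq_drop, hp, eq_comm]

theorem neg_len3 (p : String) (hp : PySem.Str.len p = 3) :
    (-(PySem.Str.len p : Int)) = -3 := by rw [hp]

theorem innerA_cons_miss (t p : String) (rest : List String)
    (h : ¬ PySem.Str.endswith t p = true) : innerA t (p :: rest) = innerA t rest := by
  simp only [innerA]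
  rw [if_neg h]

theorem innerA_cons_skip (t p : String) (rest : List String) (hp : PySem.Str.len p = 3)
    (h : ¬ 1 < PySem.Str.len (PySem.Str.slice t none (some (-3)))) :
    innerA t (p :: rest) = innerA t rest := by
  simp only [innerA, neg_len3 p hp, if_neg h, ite_self]

theorem innerA_cons_hit (t p : String) (rest : List String) (hp : PySem.Str.len p = 3)
    (he : PySem.Str.endswith t p = true)
    (h : 1 < PySem.Str.len (PySem.Str.slice t none (some (-3)))) :
    innerA t (p :: rest) = some (PySem.Str.slice t none (some (-3)), p) := by
  simp only [innerA, neg_len3 p hp]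
  rw [if_pos he, if_pos h]

theorem decide_len_gt_four (t : String) (h4 : 4 < t.length) :
    (decide (4 < PySem.Str.len t)) = true := by
  rw [PySem.Str.len_eq]
  exact decide_eq_true (by exact_mod_cast h4)

theorem step_eq (t : String) :
    (match innerA t particles with
      | some (root, p) => [root, "-" ++ p]
      | none => [t]) =
    (if 4 < PySem.Str.len t
        && PySem.Set.contains particleSet (PySem.Str.slice t (some (-3)) none) then
      [PySem.Str.slice t none (some (-3)), "-" ++ PySem.Str.slice t (some (-3)) none]
    else [t]) := by
  have hlt : t.toList.length = t.length := String.length_toList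
  by_cases h4 : 4 < t.length
  · -- long tokens: A finds the unique length-3 suffix particle iff B's set lookup succeeds
    have hr : 1 < PySem.Str.len (PySem.Str.slice t none (some (-3))) := by
      rw [rootA_len]; omega
    by_cases hl : t.toList.drop (t.toList.length - 3) = "lah".toList
    · have hsfx : PySem.Str.slice t (some (-3)) none = "lah" :=
        String.toList_inj.mp ((suffix_toList t).trans hl)
      rw [show particles = ["lah", "kah", "tah", "pun"] from rfl,
        innerA_cons_hit t "lah" _ (by decide) ((endswith_len3 t "lah" (by decide)).mpr hl) hr,
        hsfx, if_pos (by rw [Bool.and_eq_true, decide_len_gt_four t h4]; exact ⟨rfl, by decide⟩)]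
    · by_cases hk : t.toList.drop (t.toList.length - 3) = "kah".toList
      · have hsfx : PySem.Str.slice t (some (-3)) none = "kah" :=
          String.toList_inj.mp ((suffix_toList t).trans hk)
        rw [show particles = ["lah", "kah", "tah", "pun"] from rfl,
          innerA_cons_miss t "lah" _ (fun h => hl ((endswith_len3 t "lah" (by decide)).mp h)),
          innerA_cons_hit t "kah" _ (by decide) ((endswith_len3 t "kah" (by decide)).mpr hk) hr,
          hsfx, if_pos (by rw [Bool.and_eq_true, decide_len_gt_four t h4]; exact ⟨rfl, by decide⟩)]
      · by_cases ht : t.toList.drop (t.toList.length - 3) = "tah".toList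
        · have hsfx : PySem.Str.slice t (some (-3)) none = "tah" :=
            String.toList_inj.mp ((suffix_toList t).trans ht)
          rw [show particles = ["lah", "kah", "tah", "pun"] from rfl,
            innerA_cons_miss t "lah" _ (fun h => hl ((endswith_len3 t "lah" (by decide)).mp h)),
            innerA_cons_miss t "kah" _ (fun h => hk ((endswith_len3 t "kah" (by decide)).mp h)),
            innerA_cons_hit t "tah" _ (by decide) ((endswith_len3 t "tah" (by decide)).mpr ht) hr,
            hsfx, if_pos (by rw [Bool.and_eq_true, decide_len_gt_four t h4]; exact ⟨rfl, by decide⟩)]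
        · by_cases hn : t.toList.drop (t.toList.length - 3) = "pun".toList
          · have hsfx : PySem.Str.slice t (some (-3)) none = "pun" :=
              String.toList_inj.mp ((suffix_toList t).trans hn)
            rw [show particles = ["lah", "kah", "tah", "pun"] from rfl,
              innerA_cons_miss t "lah" _ (fun h => hl ((endswith_len3 t "lah" (by decide)).mp h)),
              innerA_cons_miss t "kah" _ (fun h => hk ((endswith_len3 t "kah" (by decide)).mp h)),
              innerA_cons_miss t "tah" _ (fun h => ht ((endswith_len3 t "tah" (by decide)).mp h)),
              innerA_cons_hit t "pun" _ (by decide) ((endswith_len3 t "pun" (by decide)).mpr hn) hr,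
              hsfx, if_pos (by rw [Bool.and_eq_true, decide_len_gt_four t h4]; exact ⟨rfl, by decide⟩)]
          · -- no particle matches: both sides keep the token unchanged
            have hnm : PySem.Str.slice t (some (-3)) none ∉ particleSet := by
              intro hmem
              rw [show particleSet = PySem.Set.ofList ["lah", "kah", "tah", "pun"] from rfl,
                PySem.Set.mem_ofList] at hmem
              have h4cases : PySem.Str.slice t (some (-3)) none = "lah" ∨
                  PySem.Str.slice t (some (-3)) none = "kah" ∨
                  PySem.Str.slice t (some (-3)) none = "tah" ∨
                  PySem.Str.slice t (some (-3)) none = "pun" := by simpa using hmem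
              rcases h4cases with h' | h' | h' | h'
              · exact hl ((suffix_toList t).symm.trans (congrArg String.toList h'))
              · exact hk ((suffix_toList t).symm.trans (congrArg String.toList h'))
              · exact ht ((suffix_toList t).symm.trans (congrArg String.toList h'))
              · exact hn ((suffix_toList t).symm.trans (congrArg String.toList h'))
            rw [show particles = ["lah", "kah", "tah", "pun"] from rfl,
              innerA_cons_miss t "lah" _ (fun h => hl ((endswith_len3 t "lah" (by decide)).mp h)),
              innerA_cons_miss t "kah" _ (fun h => hk ((endswith_len3 t "kah" (by decide)).mp h)),
              innerA_cons_miss t "tah" _ (fun h => ht ((endswith_len3 t "tah" (by decide)).mp h)),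
              innerA_cons_miss t "pun" _ (fun h => hn ((endswith_len3 t "pun" (by decide)).mp h)),
              if_neg (by
                rw [Bool.and_eq_true]
                rintro ⟨-, hc⟩
                exact hnm ((PySem.Set.contains_iff _ _).mp hc))]
            rfl
  · -- short tokens (length ≤ 4): A's root-length test fails on every particle, B's length test fails
    have hr : ¬ 1 < PySem.Str.len (PySem.Str.slice t none (some (-3))) := by
      rw [rootA_len]; omega
    rw [show particles = ["lah", "kah", "tah", "pun"] from rfl,
      innerA_cons_skip t "lah" _ (by decide) hr, innerA_cons_skip t "kah" _ (by decide) hr,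
      innerA_cons_skip t "tah" _ (by decide) hr, innerA_cons_skip t "pun" _ (by decide) hr,
      if_neg (by
        rw [Bool.and_eq_true, PySem.Str.len_eq]
        rintro ⟨hc, -⟩
        exact h4 (by exact_mod_cast of_decide_eq_true hc))]
    rfl

-- ===== VERDICT (by name: the statement is the Claim_ definition above) =====
theorem split_particles_spec : Claim_equal_split_particles := by
  intro tokens _
  unfold Spec_split_particles split_particles split_particles_alt
  congr 1
  funext acc u
  rw [sorted_particles_eq]
  have hstep := step_eq u
  rcases h : innerA u particles with _ | ⟨r, p⟩ <;> rw [h] at hstep <;> simp only at hstep ⊢ <;>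
    split_ifs with hc
  all_goals first
    | rfl
    | (rw [if_pos hc] at hstep; rw [hstep])
    | (rw [if_neg hc] at hstep; rw [hstep])
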